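-- pv_equiv track=rewrite | github.com/eric19958/test1 | dopf.py | conformity
-- ===== SOURCE A (Python) =====
-- def conformity(data_orderx_do, data_orderx_posle):
--     new_product2 = []
--     check = True
--     for product in data_orderx_posle:
--         new_product2.append([product[0], product[1]])
--     for i in range(len(new_product2) - 1):
--         for j in range(i + 1, len(new_product2)):
--             if new_product2[j][1] == new_product2[i][1]:
--                 new_product2[i][0] += new_product2[j][0]
--                 new_product2[j][0] = 0
--     nnp = []
--     for el in new_product2:
--         if el[0] != 0:
--             # new_product2.remove(el)
--             nnp.append(el)
--     new_product2 = nnp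
--     for i in new_product2:
--         if not i in data_orderx_do:
--             check = False
--             break
--     return check
-- ===== SOURCE B (Python) =====
-- def conformity(data_orderx_do, data_orderx_posle):
--     # One pass: aggregate quantities per key in a dict (first-seen key order),
--     # then check each nonzero aggregate [total, key] for membership in data_orderx_do.
--     totals = {}
--     for product in data_orderx_posle:
--         key = product[1]
--         totals[key] = totals.get(key, 0) + product[0]
--     for key, total in totals.items():
--         if total != 0 and [total, key] not in data_orderx_do:
--             return False
--     return True
-- ===== Notes on version B (the rewrite author's own statement) =====
-- stated objective: simpler
-- what changed: Replaces A's quadratic nested pairwise-summation loop (which zeroes duplicates in place and then filters) with a single dict-building pass that sums quantities per key in first-seen order, then checks each nonzero aggregate for membership.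
import Mathlib
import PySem

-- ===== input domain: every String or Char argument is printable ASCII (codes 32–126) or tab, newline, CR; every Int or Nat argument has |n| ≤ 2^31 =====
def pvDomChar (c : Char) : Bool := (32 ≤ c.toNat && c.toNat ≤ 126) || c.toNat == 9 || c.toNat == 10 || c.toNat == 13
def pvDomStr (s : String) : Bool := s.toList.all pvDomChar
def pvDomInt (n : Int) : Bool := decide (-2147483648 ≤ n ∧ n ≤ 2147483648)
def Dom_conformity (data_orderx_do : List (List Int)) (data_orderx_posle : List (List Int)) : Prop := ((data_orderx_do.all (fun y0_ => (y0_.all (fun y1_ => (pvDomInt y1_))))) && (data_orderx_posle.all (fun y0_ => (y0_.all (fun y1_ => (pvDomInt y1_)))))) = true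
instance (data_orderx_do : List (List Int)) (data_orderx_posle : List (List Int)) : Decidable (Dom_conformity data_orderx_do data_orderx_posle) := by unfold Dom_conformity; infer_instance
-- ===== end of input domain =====

-- B replaces A's nested in-place pairwise-summation loop by a single dict-building pass
-- (sum per key, first-seen order) followed by one membership check per nonzero aggregate.

-- ===== PORT A =====
-- Port notes: the loop indices produced by range(len-1) / range(i+1, len) are nonnegative and
-- in range, so they are ported over Nat with List.range/List.range' and List.getD/List.set;
-- row accesses product[0] / product[1] use List.getD with default 0, which Pre_ (every row of
-- data_orderx_posle has length ≥ 2; Python raises IndexError otherwise) keeps unread.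
def conformity (data_orderx_do : List (List Int)) (data_orderx_posle : List (List Int)) : Bool :=
  let new_product2 := data_orderx_posle.foldl
    (fun acc product => acc ++ [[product.getD 0 0, product.getD 1 0]]) []
  let n := new_product2.length
  let np2 := (List.range (n - 1)).foldl (fun acc i =>
    (List.range' (i + 1) (n - (i + 1))).foldl (fun l j =>
      if (l.getD j []).getD 1 0 = (l.getD i []).getD 1 0 then
        (l.set i [(l.getD i []).getD 0 0 + (l.getD j []).getD 0 0,
                  (l.getD i []).getD 1 0]).set j [0, (l.getD j []).getD 1 0]
      else l) acc) new_product2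
  let nnp := np2.foldl (fun acc el => if el.getD 0 0 != 0 then acc ++ [el] else acc) []
  nnp.all (fun i => data_orderx_do.contains i)

-- ===== PORT B =====
def conformity_alt (data_orderx_do : List (List Int)) (data_orderx_posle : List (List Int)) : Bool :=
  let totals := data_orderx_posle.foldl
    (fun d product => d.insert (product.getD 1 0) (d.getD (product.getD 1 0) 0 + product.getD 0 0))
    (PySem.Dict.empty : PySem.Dict Int Int)
  totals.items.all (fun kt => kt.2 == 0 || data_orderx_do.contains [kt.2, kt.1])

-- ===== PRECONDITION & SPEC =====
-- Pre_ excludes exactly the inputs where the Python raises IndexError (a row of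
-- data_orderx_posle with fewer than 2 elements: product[0] / product[1]).
def Pre_conformity (data_orderx_do : List (List Int)) (data_orderx_posle : List (List Int)) : Prop :=
  ∀ p ∈ data_orderx_posle, 2 ≤ p.length
instance (data_orderx_do : List (List Int)) (data_orderx_posle : List (List Int)) : Decidable (Pre_conformity data_orderx_do data_orderx_posle) := by unfold Pre_conformity; infer_instance
def pvWitness_conformity : List (List Int) × List (List Int) := ([[3, 5]], [[1, 5], [2, 5]])

def Spec_conformity (data_orderx_do : List (List Int)) (data_orderx_posle : List (List Int)) (out : Bool) : Prop := out = conformity_alt data_orderx_do data_orderx_posle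
instance (data_orderx_do : List (List Int)) (data_orderx_posle : List (List Int)) (out : Bool) : Decidable (Spec_conformity data_orderx_do data_orderx_posle out) := by unfold Spec_conformity; infer_instance

-- ===== CLAIM (what is proved, stated in full; the proofs are below) =====
def Claim_equal_conformity : Prop := ∀ (data_orderx_do : List (List Int)) (data_orderx_posle : List (List Int)), Dom_conformity data_orderx_do data_orderx_posle → Pre_conformity data_orderx_do data_orderx_posle → Spec_conformity data_orderx_do data_orderx_posle (conformity data_orderx_do data_orderx_posle)

-- ===== LEMMAS AND PROOFS =====

-- value and key of a 2-element row [v, k] (also reads raw posle rows: getD 0 / getD 1)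
def pvVal (r : List Int) : Int := r.getD 0 0
def pvKey (r : List Int) : Int := r.getD 1 0
-- total quantity of key k in l
def pvS (l : List (List Int)) (k : Int) : Int := (l.map (fun r => if pvKey r = k then pvVal r else 0)).sum
-- zero out every row of key k
def pvZero (k : Int) (l : List (List Int))  : List (List Int) :=
  l.map (fun r => if pvKey r = k then [0, pvKey r] else r)
-- the semantic content of A's nested loop: collapse duplicates onto the first occurrence
def pvCollapse : List (List Int) → List (List Int)
  | [] => []
  | r :: rest => [pvVal r + pvS rest (pvKey r), pvKey r] :: pvCollapse (pvZero (pvKey r) rest)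
termination_by l => l.length
decreasing_by simp [pvZero]
lemma pvKey_pair (a b : Int) : pvKey [a, b] = b := rfl
lemma pvVal_pair (a b : Int) : pvVal [a, b] = a := rfl

-- every row is a 2-element list
def pvShape (l : List (List Int)) : Prop := ∀ r ∈ l, ∃ a b : Int, r = [a, b]

-- A's inner-loop step at indices (i, j)
def pvStep (i j : Nat) (l : List (List Int)) : List (List Int) :=
  if (l.getD j []).getD 1 0 = (l.getD i []).getD 1 0 then
    (l.set i [(l.getD i []).getD 0 0 + (l.getD j []).getD 0 0,
              (l.getD i []).getD 1 0]).set j [0, (l.getD j []).getD 1 0]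
  else l
-- A's inner loop (for j in range(i+1, n))
def pvInner (n i : Nat) (acc : List (List Int)) : List (List Int) :=
  (List.range' (i + 1) (n - (i + 1))).foldl (fun l j => pvStep i j l) acc
-- A's outer loop (for i in range(n-1))
def pvOuter (n : Nat) (l : List (List Int)) : List (List Int) :=
  (List.range (n - 1)).foldl (fun acc i => pvInner n i acc) l

lemma pv_getD_mid (done rest : List (List Int)) (t : List Int) :
    (done ++ t :: rest).getD done.length [] = t := by
  induction done with
  | nil => rfl
  | cons d ds ih => simpa using ih

lemma pv_set_mid (done rest : List (List Int)) (t v : List Int) :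
    (done ++ t :: rest).set done.length v = done ++ v :: rest := by
  induction done with
  | nil => rfl
  | cons d ds ih => simp [ih]

lemma pvInner_zero : ∀ (todo : List (List Int)) (x : List Int), (∃ a b : Int, x = [a, b]) →
    ∀ done : List (List Int),
    (List.range' (done.length + 1) todo.length).foldl (fun l j => pvStep 0 j l)
        (x :: (done ++ todo))
      = [pvVal x + pvS todo (pvKey x), pvKey x] :: (done ++ pvZero (pvKey x) todo) := by
  intro todo
  induction todo with
  | nil =>
    rintro x ⟨a, b, rfl⟩ done
    simp [pvS, pvZero, pvVal_pair, pvKey_pair]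
  | cons t rest ih =>
    intro x hx done
    rw [List.length_cons, List.range'_succ, List.foldl_cons]
    have hstep : pvStep 0 (done.length + 1) (x :: (done ++ t :: rest))
        = if pvKey t = pvKey x then
            [pvVal x + pvVal t, pvKey x] :: (done ++ [0, pvKey t] :: rest)
          else x :: (done ++ t :: rest) := by
      simp only [pvStep, List.getD_cons_succ, List.getD_cons_zero, pv_getD_mid,
        List.set_cons_succ, List.set_cons_zero, pv_set_mid]
      rfl
    rw [hstep]
    by_cases hc : pvKey t = pvKey x
    · rw [if_pos hc]
      have h1 : done ++ [0, pvKey t] :: rest = (done ++ [[0, pvKey t]]) ++ rest := by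
        simp
      have h2 : done.length + 1 + 1 = (done ++ [[0, pvKey t]]).length + 1 := by
        simp
      rw [h1, h2, ih _ ⟨pvVal x + pvVal t, pvKey x, rfl⟩ (done ++ [[0, pvKey t]])]
      simp only [pvKey_pair, pvVal_pair, pvS, pvZero, List.map_cons, List.sum_cons,
        if_pos hc, List.append_assoc, List.cons_append, List.nil_append, add_assoc]
      rfl
    · rw [if_neg hc]
      have h1 : x :: (done ++ t :: rest) = x :: ((done ++ [t]) ++ rest) := by simp
      have h2 : done.length + 1 + 1 = (done ++ [t]).length + 1 := by simp
      rw [h1, h2, ih x hx (done ++ [t])]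
      simp only [pvS, pvZero, List.map_cons, List.sum_cons, if_neg hc,
        List.append_assoc, List.cons_append, List.nil_append, zero_add]

lemma pvStep_cons (i j : Nat) (x : List Int) (l : List (List Int)) :
    pvStep (i + 1) (j + 1) (x :: l) = x :: pvStep i j l := by
  simp only [pvStep, List.getD_cons_succ, List.set_cons_succ]
  split <;> rfl

lemma pvFoldl_step_cons (js : List Nat) (i : Nat) (x : List Int) :
    ∀ l : List (List Int),
    js.foldl (fun L j => pvStep (i + 1) (j + 1) L) (x :: l)
      = x :: js.foldl (fun L j => pvStep i j L) l := by
  induction js with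
  | nil => intro l; rfl
  | cons j js ih => intro l; rw [List.foldl_cons, List.foldl_cons, pvStep_cons, ih]

lemma pvInner_cons (n i : Nat) (x : List Int) (l : List (List Int)) :
    pvInner n (i + 1) (x :: l) = x :: pvInner (n - 1) i l := by
  unfold pvInner
  rw [show n - 1 - (i + 1) = n - (i + 1 + 1) from by omega,
    show i + 1 + 1 = (i + 1) + 1 from rfl,
    List.range'_succ_left, List.foldl_map, pvFoldl_step_cons]

lemma pvOuterFold_cons (js : List Nat) (n : Nat) (x : List Int) :
    ∀ l : List (List Int),
    js.foldl (fun acc i => pvInner n (i + 1) acc) (x :: l)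
      = x :: js.foldl (fun acc i => pvInner (n - 1) i acc) l := by
  induction js with
  | nil => intro l; rfl
  | cons j js ih => intro l; rw [List.foldl_cons, List.foldl_cons, pvInner_cons, ih]

lemma pvShape_zero (k : Int) (l : List (List Int)) (h : pvShape l) : pvShape (pvZero k l) := by
  intro r hr
  simp only [pvZero, List.mem_map] at hr
  obtain ⟨r', hr', rfl⟩ := hr
  by_cases hk : pvKey r' = k
  · exact ⟨0, pvKey r', by simp [hk]⟩
  · simpa [hk] using h r' hr'

lemma pvMain (m : Nat) : ∀ l : List (List Int), l.length = m → pvShape l →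
    pvOuter l.length l = pvCollapse l := by
  induction m using Nat.strong_induction_on with
  | _ m IH =>
    intro l hl hshape
    match l with
    | [] => simp [pvOuter, pvCollapse]
    | [x] =>
      obtain ⟨a, b, rfl⟩ := hshape x (by simp)
      simp [pvOuter, pvCollapse, pvS, pvZero, pvVal_pair, pvKey_pair]
    | x :: y :: l'' =>
      have hx := hshape x (by simp)
      have hz : pvShape (pvZero (pvKey x) (y :: l'')) :=
        pvShape_zero _ _ (fun r hr => hshape r (by simp [hr]))
      have hlen : (pvZero (pvKey x) (y :: l'')).length = (y :: l'').length := by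
        simp [pvZero]
      have h0 : pvInner (x :: y :: l'').length 0 (x :: (y :: l''))
          = [pvVal x + pvS (y :: l'') (pvKey x), pvKey x]
            :: pvZero (pvKey x) (y :: l'') := by
        have := pvInner_zero (y :: l'') x hx []
        simpa [pvInner] using this
      have houter : pvOuter (x :: y :: l'').length (x :: y :: l'')
          = [pvVal x + pvS (y :: l'') (pvKey x), pvKey x]
            :: pvOuter (y :: l'').length (pvZero (pvKey x) (y :: l'')) := by
        unfold pvOuter
        rw [show (x :: y :: l'').length - 1 = (y :: l'').length from by simp,
          show (y :: l'').length = l''.length + 1 from by simp,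
          List.range_succ_eq_map, List.foldl_cons, h0, List.foldl_map]
        rw [show (l''.length + 1) - 1 = l''.length from by simp]
        have := pvOuterFold_cons (List.range l''.length) (x :: y :: l'').length
          [pvVal x + pvS (y :: l'') (pvKey x), pvKey x] (pvZero (pvKey x) (y :: l''))
        simp only [show (x :: y :: l'').length - 1 = l''.length + 1 from by simp] at this
        convert this using 2
      rw [houter, ← hlen,
        IH (pvZero (pvKey x) (y :: l'')).length (by simp [hlen, ← hl]) _ rfl hz]
      conv_rhs => rw [pvCollapse]

lemma pvKey_zero (k : Int) (l : List (List Int)) :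
    (pvZero k l).map pvKey = l.map pvKey := by
  induction l with
  | nil => rfl
  | cons r rest ih =>
    have hr : pvKey (if pvKey r = k then [0, pvKey r] else r) = pvKey r := by
      by_cases hk : pvKey r = k <;> simp [hk, pvKey_pair]
    simp only [pvZero, List.map_cons] at ih ⊢
    rw [hr, ih]

lemma pvS_zero (k : Int) (l : List (List Int)) (k' : Int) :
    pvS (pvZero k l) k' = if k' = k then 0 else pvS l k' := by
  induction l with
  | nil => simp [pvS, pvZero]
  | cons r rest ih =>
    have hrow : (if pvKey (if pvKey r = k then [0, pvKey r] else r) = k'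
          then pvVal (if pvKey r = k then [0, pvKey r] else r) else 0)
        = if pvKey r = k ∧ pvKey r = k' then 0
          else if pvKey r = k' then pvVal r else 0 := by
      by_cases hk : pvKey r = k
      · rw [if_pos hk, pvKey_pair, pvVal_pair]
        by_cases hk' : pvKey r = k'
        · rw [if_pos hk', if_pos ⟨hk, hk'⟩]
        · rw [if_neg hk', if_neg (fun h => hk' h.2), if_neg hk']
      · rw [if_neg hk]; simp [hk]
    simp only [pvZero, pvS, List.map_cons, List.sum_cons] at ih ⊢
    rw [hrow]
    have ih' : (List.map (fun r => if pvKey r = k' then pvVal r else 0)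
        (List.map (fun r => if pvKey r = k then [0, pvKey r] else r) rest)).sum
        = if k' = k then 0 else (List.map (fun r => if pvKey r = k' then pvVal r else 0) rest).sum := ih
    rw [ih']
    split_ifs <;> omega

lemma pvFilterMap_discard (x : Int) (g f : Int → Option (List Int))
    (hgx : g x = none) (hagree : ∀ k, k ≠ x → g k = f k) :
    ∀ s : List Int, s.filterMap g = (PySem.Set.discard s x).filterMap f := by
  intro s
  induction s with
  | nil => rfl
  | cons a s ih =>
    simp only [PySem.Set.discard] at ih ⊢
    rw [List.filterMap_cons, List.filter_cons]
    by_cases ha : a = x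
    · subst ha; simp [hgx, ih]
    · rw [hagree a ha]
      cases hfa : f a <;> simp [ha, hfa, ih]

lemma pvFilterCollapse (m : Nat) : ∀ l : List (List Int), l.length = m →
    (pvCollapse l).filter (fun el => el.getD 0 0 != 0)
      = (PySem.Set.ofList (l.map pvKey)).filterMap
          (fun k => if pvS l k = 0 then none else some [pvS l k, k]) := by
  induction m using Nat.strong_induction_on with
  | _ m IH =>
    intro l hl
    match l with
    | [] => simp [pvCollapse]
    | x :: l' =>
      have hlen : (pvZero (pvKey x) l').length = l'.length := by simp [pvZero]
      have hS : pvS (x :: l') (pvKey x) = pvVal x + pvS l' (pvKey x) := by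
        simp [pvS]
      have hS' : ∀ k, k ≠ pvKey x → pvS (x :: l') k = pvS l' k := by
        intro k hk
        simp only [pvS, List.map_cons, List.sum_cons]
        rw [if_neg (fun h : pvKey x = k => hk h.symm), zero_add]
      rw [show pvCollapse (x :: l')
          = [pvVal x + pvS l' (pvKey x), pvKey x] :: pvCollapse (pvZero (pvKey x) l')
          from by rw [pvCollapse]]
      rw [List.filter_cons,
        IH (pvZero (pvKey x) l').length (by simp [hlen, ← hl]) _ rfl]
      have hmk : (pvZero (pvKey x) l').map pvKey = l'.map pvKey := pvKey_zero _ _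
      rw [hmk]
      have hdisc : (PySem.Set.ofList (l'.map pvKey)).filterMap
            (fun k => if pvS (pvZero (pvKey x) l') k = 0 then none
                      else some [pvS (pvZero (pvKey x) l') k, k])
          = (PySem.Set.discard (PySem.Set.ofList (l'.map pvKey)) (pvKey x)).filterMap
            (fun k => if pvS (x :: l') k = 0 then none else some [pvS (x :: l') k, k]) := by
        refine pvFilterMap_discard (pvKey x) _ _ ?_ ?_ _
        · rw [pvS_zero, if_pos rfl]
          simp
        · intro k hk
          rw [pvS_zero, if_neg hk, hS' k hk]
      rw [hdisc,
        show (x :: l').map pvKey = pvKey x :: l'.map pvKey from rfl,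
        PySem.Set.ofList_cons, List.filterMap_cons]
      by_cases hv : pvS (x :: l') (pvKey x) = 0
      · rw [if_pos hv]
        rw [show (([pvVal x + pvS l' (pvKey x), pvKey x] : List Int).getD 0 0 != 0) = false
          from by simp [← hS, hv]]
        simp
      · rw [if_neg hv]
        rw [show (([pvVal x + pvS l' (pvKey x), pvKey x] : List Int).getD 0 0 != 0) = true
          from by simp; omega]
        rw [hS]
        simp

lemma pvDict_getD (l : List (List Int)) :
    ∀ (d : PySem.Dict Int Int) (k : Int),
    (l.foldl (fun d p => d.insert (p.getD 1 0) (d.getD (p.getD 1 0) 0 + p.getD 0 0)) d).getD k 0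
      = d.getD k 0 + pvS l k := by
  induction l with
  | nil => intro d k; simp [pvS]
  | cons p rest ih =>
    intro d k
    rw [List.foldl_cons, ih, PySem.Dict.getD_insert]
    simp only [pvS, List.map_cons, List.sum_cons]
    by_cases hk : k = p.getD 1 0
    · subst hk
      simp [pvKey, pvVal]
      omega
    · rw [if_neg hk,
        if_neg (show ¬ pvKey p = k from fun h => hk (by simpa [pvKey] using h.symm))]
      omega

lemma pvAll_filterMap (dol : List (List Int)) (S : Int → Int) :
    ∀ s : List Int,
    ((s.filterMap (fun k => if S k = 0 then none else some [S k, k])).all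
        (fun i => dol.contains i))
      = s.all (fun k => S k == 0 || dol.contains [S k, k]) := by
  intro s
  induction s with
  | nil => rfl
  | cons a s ih =>
    rw [List.filterMap_cons, List.all_cons]
    by_cases ha : S a = 0
    · rw [if_pos ha, ih, ha]
      simp
    · rw [if_neg ha, List.all_cons, ih,
        show (S a == 0) = false from by simpa using ha, Bool.false_or]

lemma pvAll_congr (l : List Int) (f g : Int → Bool) (h : ∀ x ∈ l, f x = g x) :
    l.all f = l.all g := by
  induction l with
  | nil => rfl
  | cons a s ih =>
    rw [List.all_cons, List.all_cons, h a (by simp),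
      ih (fun x hx => h x (by simp [hx]))]

lemma pvKey_np (posle : List (List Int)) :
    (posle.map (fun p => [p.getD 0 0, p.getD 1 0])).map pvKey = posle.map pvKey := by
  rw [List.map_map]
  rfl

lemma pvS_np (posle : List (List Int)) (k : Int) :
    pvS (posle.map (fun p => [p.getD 0 0, p.getD 1 0])) k = pvS posle k := by
  unfold pvS
  rw [List.map_map]
  rfl

lemma pvShape_np (posle : List (List Int)) :
    pvShape (posle.map (fun p => [p.getD 0 0, p.getD 1 0])) := by
  intro r hr
  simp only [List.mem_map] at hr
  obtain ⟨p, _, rfl⟩ := hr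
  exact ⟨_, _, rfl⟩

lemma pvA_eq (dol posle : List (List Int)) :
    conformity dol posle
      = (PySem.Set.ofList (posle.map pvKey)).all
          (fun k => pvS posle k == 0 || dol.contains [pvS posle k, k]) := by
  have h0 : conformity dol posle
      = ((pvOuter (posle.map (fun p => [p.getD 0 0, p.getD 1 0])).length
            (posle.map (fun p => [p.getD 0 0, p.getD 1 0]))).filter
          (fun el => el.getD 0 0 != 0)).all (fun i => dol.contains i) := by
    unfold conformity pvOuter pvInner pvStep
    simp only [PySem.List.foldl_append_singleton_eq_map, List.nil_append,
      PySem.List.foldl_append_if, List.map_id']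
  rw [h0, pvMain _ _ rfl (pvShape_np posle), pvFilterCollapse _ _ rfl, pvKey_np]
  have hfm : (PySem.Set.ofList (posle.map pvKey)).filterMap
        (fun k => if pvS (posle.map (fun p => [p.getD 0 0, p.getD 1 0])) k = 0 then none
                  else some [pvS (posle.map (fun p => [p.getD 0 0, p.getD 1 0])) k, k])
      = (PySem.Set.ofList (posle.map pvKey)).filterMap
        (fun k => if pvS posle k = 0 then none else some [pvS posle k, k]) := by
    simp only [pvS_np]
  rw [hfm, pvAll_filterMap]

lemma pvB_eq (dol posle : List (List Int)) :
    conformity_alt dol posle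
      = (PySem.Set.ofList (posle.map pvKey)).all
          (fun k => pvS posle k == 0 || dol.contains [pvS posle k, k]) := by
  unfold conformity_alt
  have hnodup : ((posle.foldl (fun d product => d.insert (product.getD 1 0)
        (d.getD (product.getD 1 0) 0 + product.getD 0 0))
        (PySem.Dict.empty : PySem.Dict Int Int)).keys).Nodup :=
    PySem.Dict.nodup_keys_foldl_insert_key posle (fun p => p.getD 1 0)
      (fun d p => d.getD (p.getD 1 0) 0 + p.getD 0 0) PySem.Dict.empty
      PySem.Dict.nodup_keys_empty
  have hkeys : ((posle.foldl (fun d product => d.insert (product.getD 1 0)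
        (d.getD (product.getD 1 0) 0 + product.getD 0 0))
        (PySem.Dict.empty : PySem.Dict Int Int)).keys)
      = PySem.Set.ofList (posle.map pvKey) := by
    have := PySem.Dict.keys_foldl_insert_key posle (fun p => p.getD 1 0)
      (fun d p => d.getD (p.getD 1 0) 0 + p.getD 0 0)
      (PySem.Dict.empty : PySem.Dict Int Int)
    simpa [PySem.Set.update_nil_left] using this
  change ((posle.foldl (fun d product => d.insert (product.getD 1 0)
      (d.getD (product.getD 1 0) 0 + product.getD 0 0))
      (PySem.Dict.empty : PySem.Dict Int Int)).items.all
      (fun kt => kt.2 == 0 || dol.contains [kt.2, kt.1])) = _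
  rw [PySem.Dict.items_eq_map_keys _ hnodup 0, List.all_map, hkeys]
  refine pvAll_congr _ _ _ ?_
  intro k _
  simp only [Function.comp]
  rw [pvDict_getD, PySem.Dict.getD_empty, zero_add]

-- ===== VERDICT (by name: the statement is the Claim_ definition above) =====
theorem conformity_spec : Claim_equal_conformity := by
  intro dol posle _ _
  show conformity dol posle = conformity_alt dol posle
  rw [pvA_eq, pvB_eq]
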